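-- pv_equiv track=rewrite | github.com/AlexSublime/Comparador-planilhas | normalizer.py | _classificar_doc
-- ===== SOURCE A (Python) =====
-- def _validar_cpf(cpf: str) -> bool:
--     """
--     Valida CPF pelo dígito verificador.
--     Entrada: string com 11 dígitos numéricos.
--     """
--     if len(cpf) != 11 or not cpf.isdigit():
--         return False
--     if len(set(cpf)) == 1:          # ex: 00000000000, 11111111111
--         return False
--
--     def digito(cpf, n):
--         s = sum(int(cpf[i]) * (n - i) for i in range(n - 1))
--         r = (s * 10) % 11
--         return 0 if r == 10 else r
--
--     return digito(cpf, 10) == int(cpf[9]) and digito(cpf, 11) == int(cpf[10])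
--
-- def _validar_cnpj(cnpj: str) -> bool:
--     """
--     Valida CNPJ pelo dígito verificador.
--     Entrada: string com 14 dígitos numéricos.
--     """
--     if len(cnpj) != 14 or not cnpj.isdigit():
--         return False
--     if len(set(cnpj)) == 1:
--         return False
--
--     pesos1 = [5, 4, 3, 2, 9, 8, 7, 6, 5, 4, 3, 2]
--     pesos2 = [6, 5, 4, 3, 2, 9, 8, 7, 6, 5, 4, 3, 2]
--
--     def digito(cnpj, pesos):
--         s = sum(int(cnpj[i]) * pesos[i] for i in range(len(pesos)))
--         r = s % 11
--         return 0 if r < 2 else 11 - r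
--
--     return (digito(cnpj, pesos1) == int(cnpj[12]) and
--             digito(cnpj, pesos2) == int(cnpj[13]))
--
-- def _classificar_doc(cpf_cnpj: str) -> tuple[str, bool]:
--     """
--     Classifica e valida o documento.
--
--     Retorna
--     -------
--     (tipo_doc, doc_valido)
--         tipo_doc  : 'CPF' | 'CNPJ' | 'ESTRANGEIRO' | 'AUSENTE' | 'INVALIDO'
--         doc_valido: True se passou no dígito verificador
--     """
--     v = str(cpf_cnpj).strip()
--
--     if not v or v in ('', 'nan', 'None'):
--         return 'AUSENTE', False
--
--     digitos = ''.join(c for c in v if c.isdigit())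
--
--     if len(digitos) == 11:
--         valido = _validar_cpf(digitos)
--         return 'CPF', valido
--
--     if len(digitos) == 14:
--         valido = _validar_cnpj(digitos)
--         return 'CNPJ', valido
--
--     # Comprimento diferente de 11 ou 14 → documento estrangeiro ou formato incomum
--     if len(digitos) > 0:
--         return 'ESTRANGEIRO', False
--
--     return 'INVALIDO', False
-- ===== SOURCE B (Python) =====
-- def _dv(digits, top):
--     """Generic mod-11 check digit: walk the digits from the right with a
--     weight that starts at 2 and cycles back to 2 after `top`;
--     r = s % 11 -> 0 if r < 2 else 11 - r."""
--     s, w = 0, 2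
--     for c in reversed(digits):
--         s += int(c) * w
--         w = 2 if w == top else w + 1
--     r = s % 11
--     return 0 if r < 2 else 11 - r
--
--
-- def _classificar_doc(cpf_cnpj: str) -> tuple[str, bool]:
--     v = str(cpf_cnpj).strip()
--
--     if not v or v in ('', 'nan', 'None'):
--         return 'AUSENTE', False
--
--     digitos = ''.join(c for c in v if c.isdigit())
--     n = len(digitos)
--
--     if n == 11:  # CPF: weights climb 2..11, never cycling
--         ok = len(set(digitos)) > 1 and all(
--             _dv(digitos[:k], 11) == int(digitos[k]) for k in (9, 10))
--         return 'CPF', ok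
--
--     if n == 14:  # CNPJ: weights cycle 2..9
--         ok = len(set(digitos)) > 1 and all(
--             _dv(digitos[:k], 9) == int(digitos[k]) for k in (12, 13))
--         return 'CNPJ', ok
--
--     return ('ESTRANGEIRO', False) if n > 0 else ('INVALIDO', False)
-- ===== Notes on version B (the rewrite author's own statement) =====
-- stated objective: simpler
-- what changed: The two separate validators with their forward index-weight formulas and hard-coded weight tables are replaced by one generic check-digit helper that walks the digit prefix from the right with a single cycling weight counter (2..top) and one unified rule r=s%11 -> 0 if r<2 else 11-r, used for CPF (top=11, where A uses the distinct (s*10)%11 rule) and CNPJ (top=9) alike.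
import Mathlib
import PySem

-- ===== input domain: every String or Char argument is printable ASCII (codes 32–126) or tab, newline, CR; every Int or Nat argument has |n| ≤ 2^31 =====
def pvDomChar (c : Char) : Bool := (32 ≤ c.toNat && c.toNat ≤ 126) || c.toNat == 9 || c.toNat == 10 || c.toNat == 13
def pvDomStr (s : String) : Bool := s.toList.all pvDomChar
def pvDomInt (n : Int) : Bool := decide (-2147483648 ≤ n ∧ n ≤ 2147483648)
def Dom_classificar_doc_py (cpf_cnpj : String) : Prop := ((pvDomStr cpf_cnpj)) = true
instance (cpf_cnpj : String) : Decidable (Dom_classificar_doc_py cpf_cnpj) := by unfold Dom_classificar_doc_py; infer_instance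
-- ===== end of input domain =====

-- B replaces A's two validators (forward index weights, two rules, weight tables) by one
-- reversed-traversal check-digit helper with a cycling weight and a single mod-11 rule (objective: simpler).

-- ===== PORT A =====
-- int(c) for a single digit character (exact: only applied to chars passing isdigit)
def pvADigit (c : Char) : Int := (c.toNat : Int) - 48

-- inner helper `digito` of _validar_cpf; cpf[i] as pyGetD (in range under the len == 11 guard)
def pvACpfDigito (cpf : List Char) (n : Int) : Int :=
  let s := ((PySem.List.pyRange 0 (n - 1) 1).map
      (fun i => pvADigit (PySem.List.pyGetD cpf i ' ') * (n - i))).sum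
  let r := PySem.Int.mod (s * 10) 11
  if r == 10 then 0 else r

def pvAValidarCpf (cpf : List Char) : Bool :=
  if cpf.length != 11 || !PySem.Chars.strIsdigit cpf then false
  else if (PySem.Set.ofList cpf).length == 1 then false
  else (pvACpfDigito cpf 10 == pvADigit (PySem.List.pyGetD cpf 9 ' '))
    && (pvACpfDigito cpf 11 == pvADigit (PySem.List.pyGetD cpf 10 ' '))

def pvAPesos1 : List Int := [5, 4, 3, 2, 9, 8, 7, 6, 5, 4, 3, 2]
def pvAPesos2 : List Int := [6, 5, 4, 3, 2, 9, 8, 7, 6, 5, 4, 3, 2]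

-- inner helper `digito` of _validar_cnpj; both indexings in range under the guards
def pvACnpjDigito (cnpj : List Char) (pesos : List Int) : Int :=
  let s := ((PySem.List.pyRange 0 (PySem.List.len pesos) 1).map
      (fun i => pvADigit (PySem.List.pyGetD cnpj i ' ') * PySem.List.pyGetD pesos i 0)).sum
  let r := PySem.Int.mod s 11
  if r < 2 then 0 else 11 - r

def pvAValidarCnpj (cnpj : List Char) : Bool :=
  if cnpj.length != 14 || !PySem.Chars.strIsdigit cnpj then false
  else if (PySem.Set.ofList cnpj).length == 1 then false
  else (pvACnpjDigito cnpj pvAPesos1 == pvADigit (PySem.List.pyGetD cnpj 12 ' '))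
    && (pvACnpjDigito cnpj pvAPesos2 == pvADigit (PySem.List.pyGetD cnpj 13 ' '))

def classificar_doc_py (cpf_cnpj : String) : String × Bool :=
  let v := (PySem.Str.strip cpf_cnpj).toList
  if v.length == 0 || v == "nan".toList || v == "None".toList then ("AUSENTE", false)
  else
    let digitos := v.filter (fun c => PySem.Chars.isdigit c)
    if digitos.length == 11 then ("CPF", pvAValidarCpf digitos)
    else if digitos.length == 14 then ("CNPJ", pvAValidarCnpj digitos)
    else if digitos.length > 0 then ("ESTRANGEIRO", false)
    else ("INVALIDO", false)

-- ===== PORT B =====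
-- int(c) for a single digit character (exact: only applied to digit chars)
def pvBDigit (c : Char) : Int := (c.toNat : Int) - 48

-- _dv of Source B: reversed digits, weight starting at 2 cycling back after `top`; r = s % 11 -> 0 if r < 2 else 11 - r
def pvBDv (digits : List Char) (top : Int) : Int :=
  let p := digits.reverse.foldl
      (fun (sw : Int × Int) c =>
        (sw.1 + pvBDigit c * sw.2, if sw.2 == top then 2 else sw.2 + 1)) (0, 2)
  let r := PySem.Int.mod p.1 11
  if r < 2 then 0 else 11 - r

def classificar_doc_py_alt (cpf_cnpj : String) : String × Bool :=
  let v := (PySem.Str.strip cpf_cnpj).toList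
  if v.length == 0 || v == "nan".toList || v == "None".toList then ("AUSENTE", false)
  else
    let ds := v.filter (fun c => PySem.Chars.isdigit c)
    if ds.length == 11 then
      ("CPF", decide ((PySem.Set.ofList ds).length > 1) &&
        ([(9 : Int), 10].all (fun k =>
          pvBDv (PySem.List.slice ds none (some k)) 11 == pvBDigit (PySem.List.pyGetD ds k ' '))))
    else if ds.length == 14 then
      ("CNPJ", decide ((PySem.Set.ofList ds).length > 1) &&
        ([(12 : Int), 13].all (fun k =>
          pvBDv (PySem.List.slice ds none (some k)) 9 == pvBDigit (PySem.List.pyGetD ds k ' '))))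
    else if ds.length > 0 then ("ESTRANGEIRO", false)
    else ("INVALIDO", false)

-- ===== PRECONDITION & SPEC =====
def Spec_classificar_doc_py (cpf_cnpj : String) (out : String × Bool) : Prop := out = classificar_doc_py_alt cpf_cnpj
instance (cpf_cnpj : String) (out : String × Bool) : Decidable (Spec_classificar_doc_py cpf_cnpj out) := by unfold Spec_classificar_doc_py; infer_instance

-- ===== CLAIM (what is proved, stated in full; the proofs are below) =====
def Claim_equal_classificar_doc_py : Prop := ∀ (cpf_cnpj : String), Dom_classificar_doc_py cpf_cnpj → Spec_classificar_doc_py cpf_cnpj (classificar_doc_py cpf_cnpj)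

-- ===== LEMMAS AND PROOFS =====

-- A's CPF rule (s*10) % 11 with 10 -> 0 equals B's unified rule: 0 if s % 11 < 2 else 11 - s % 11
lemma pv_rule_emod (s : Int) :
    (if s * 10 % 11 = 10 then (0 : Int) else s * 10 % 11)
      = (if s % 11 <= 1 then 0 else 11 - s % 11) := by
  have hm : (s * 10) % 11 = (s % 11 * 10) % 11 := by
    conv_lhs => rw [Int.mul_emod]
    norm_num
  have h0 : 0 <= s % 11 := Int.emod_nonneg s (by norm_num)
  have h1 : s % 11 < 11 := Int.emod_lt_of_pos s (by norm_num)
  rw [hm]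
  generalize s % 11 = r at *
  interval_cases r <;> decide

-- check-digit comparisons agree once the weighted sums agree mod 11 (CPF rule on the left)
lemma pv_rule_iff (sA sB d : Int) (hs : sA % 11 = sB % 11) :
    ((if sA * 10 % 11 = 10 then (0 : Int) else sA * 10 % 11) = d ↔
      (if sB % 11 <= 1 then (0 : Int) else 11 - sB % 11) = d) := by
  rw [pv_rule_emod, hs]

-- same, when both sides already use the r < 2 rule (CNPJ case)
lemma pv_cnpj_iff (sA sB d : Int) (hs : sA % 11 = sB % 11) :
    ((if sA % 11 <= 1 then (0 : Int) else 11 - sA % 11) = d ↔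
      (if sB % 11 <= 1 then (0 : Int) else 11 - sB % 11) = d) := by
  rw [hs]

lemma pvBDigit_eq_pvADigit (c : Char) : pvBDigit c = pvADigit c := rfl

lemma pv_cpf_eq (L : List Char) (h : L.length = 11)
    (hd : ∀ c ∈ L, PySem.Chars.isdigit c) :
    pvAValidarCpf L = (decide ((PySem.Set.ofList L).length > 1) &&
      ([(9 : Int), 10].all (fun k =>
        pvBDv (PySem.List.slice L none (some k)) 11 == pvBDigit (PySem.List.pyGetD L k ' ')))) := by
  match L, h with
  | [c0,c1,c2,c3,c4,c5,c6,c7,c8,c9,c10], _ =>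
    have hall : PySem.Chars.strIsdigit [c0,c1,c2,c3,c4,c5,c6,c7,c8,c9,c10] = true := by
      simp only [PySem.Chars.strIsdigit, List.isEmpty, List.all]
      simp only [Bool.and_eq_true]
      exact ⟨rfl, by simp_all⟩
    have hne : (PySem.Set.ofList [c0,c1,c2,c3,c4,c5,c6,c7,c8,c9,c10]).length ≥ 1 := by
      have hmem : c0 ∈ PySem.Set.ofList [c0,c1,c2,c3,c4,c5,c6,c7,c8,c9,c10] := by
        rw [PySem.Set.mem_ofList]; simp
      cases hh : PySem.Set.ofList [c0,c1,c2,c3,c4,c5,c6,c7,c8,c9,c10] with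
      | nil => rw [hh] at hmem; simp at hmem
      | cons x t => simp
    by_cases hset : (PySem.Set.ofList [c0,c1,c2,c3,c4,c5,c6,c7,c8,c9,c10]).length = 1
    · simp [pvAValidarCpf, hall, hset]
    · have hgt : (PySem.Set.ofList [c0,c1,c2,c3,c4,c5,c6,c7,c8,c9,c10]).length > 1 := by omega
      simp only [pvAValidarCpf, hall]
      norm_num [hgt, hset]
      congr 1
      · rw [PySem.List.slice_to (xs := [c0,c1,c2,c3,c4,c5,c6,c7,c8,c9,c10]) (b := 9) (by norm_num)]
        norm_num [pvACpfDigito, pvBDv, PySem.List.pyRange_one, List.range_succ,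
          PySem.List.pyGetD, PySem.List.pyGet?, PySem.List.pyIdx?, Function.comp,
          (show Int.toNat 0 = 0 from rfl), (show Int.toNat 1 = 1 from rfl), (show Int.toNat 2 = 2 from rfl), (show Int.toNat 3 = 3 from rfl), (show Int.toNat 4 = 4 from rfl), (show Int.toNat 5 = 5 from rfl), (show Int.toNat 6 = 6 from rfl), (show Int.toNat 7 = 7 from rfl), (show Int.toNat 8 = 8 from rfl), (show Int.toNat 9 = 9 from rfl), (show Int.toNat 10 = 10 from rfl), (show Int.toNat 11 = 11 from rfl), (show Int.toNat 12 = 12 from rfl), (show Int.toNat 13 = 13 from rfl), pvBDigit_eq_pvADigit, List.foldl]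
        exact pv_rule_iff _ _ _ (by omega)
      · rw [PySem.List.slice_to (xs := [c0,c1,c2,c3,c4,c5,c6,c7,c8,c9,c10]) (b := 10) (by norm_num)]
        norm_num [pvACpfDigito, pvBDv, PySem.List.pyRange_one, List.range_succ,
          PySem.List.pyGetD, PySem.List.pyGet?, PySem.List.pyIdx?, Function.comp,
          (show Int.toNat 0 = 0 from rfl), (show Int.toNat 1 = 1 from rfl), (show Int.toNat 2 = 2 from rfl), (show Int.toNat 3 = 3 from rfl), (show Int.toNat 4 = 4 from rfl), (show Int.toNat 5 = 5 from rfl), (show Int.toNat 6 = 6 from rfl), (show Int.toNat 7 = 7 from rfl), (show Int.toNat 8 = 8 from rfl), (show Int.toNat 9 = 9 from rfl), (show Int.toNat 10 = 10 from rfl), (show Int.toNat 11 = 11 from rfl), (show Int.toNat 12 = 12 from rfl), (show Int.toNat 13 = 13 from rfl), pvBDigit_eq_pvADigit, List.foldl]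
        exact pv_rule_iff _ _ _ (by omega)

lemma pv_cnpj_eq (L : List Char) (h : L.length = 14)
    (hd : ∀ c ∈ L, PySem.Chars.isdigit c) :
    pvAValidarCnpj L = (decide ((PySem.Set.ofList L).length > 1) &&
      ([(12 : Int), 13].all (fun k =>
        pvBDv (PySem.List.slice L none (some k)) 9 == pvBDigit (PySem.List.pyGetD L k ' ')))) := by
  match L, h with
  | [c0,c1,c2,c3,c4,c5,c6,c7,c8,c9,c10,c11,c12,c13], _ =>
    have hall : PySem.Chars.strIsdigit [c0,c1,c2,c3,c4,c5,c6,c7,c8,c9,c10,c11,c12,c13] = true := by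
      simp only [PySem.Chars.strIsdigit, List.isEmpty, List.all]
      simp only [Bool.and_eq_true]
      exact ⟨rfl, by simp_all⟩
    have hne : (PySem.Set.ofList [c0,c1,c2,c3,c4,c5,c6,c7,c8,c9,c10,c11,c12,c13]).length ≥ 1 := by
      have hmem : c0 ∈ PySem.Set.ofList [c0,c1,c2,c3,c4,c5,c6,c7,c8,c9,c10,c11,c12,c13] := by
        rw [PySem.Set.mem_ofList]; simp
      cases hh : PySem.Set.ofList [c0,c1,c2,c3,c4,c5,c6,c7,c8,c9,c10,c11,c12,c13] with
      | nil => rw [hh] at hmem; simp at hmem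
      | cons x t => simp
    by_cases hset : (PySem.Set.ofList [c0,c1,c2,c3,c4,c5,c6,c7,c8,c9,c10,c11,c12,c13]).length = 1
    · simp [pvAValidarCnpj, hall, hset]
    · have hgt : (PySem.Set.ofList [c0,c1,c2,c3,c4,c5,c6,c7,c8,c9,c10,c11,c12,c13]).length > 1 := by omega
      simp only [pvAValidarCnpj, hall]
      norm_num [hgt, hset]
      congr 1
      · rw [PySem.List.slice_to (xs := [c0,c1,c2,c3,c4,c5,c6,c7,c8,c9,c10,c11,c12,c13]) (b := 12) (by norm_num)]
        norm_num [pvACnpjDigito, pvAPesos1, pvBDv, PySem.List.pyRange_one, List.range_succ,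
          PySem.List.pyGetD, PySem.List.pyGet?, PySem.List.pyIdx?, Function.comp, PySem.List.len,
          (show Int.toNat 0 = 0 from rfl), (show Int.toNat 1 = 1 from rfl), (show Int.toNat 2 = 2 from rfl), (show Int.toNat 3 = 3 from rfl), (show Int.toNat 4 = 4 from rfl), (show Int.toNat 5 = 5 from rfl), (show Int.toNat 6 = 6 from rfl), (show Int.toNat 7 = 7 from rfl), (show Int.toNat 8 = 8 from rfl), (show Int.toNat 9 = 9 from rfl), (show Int.toNat 10 = 10 from rfl), (show Int.toNat 11 = 11 from rfl), (show Int.toNat 12 = 12 from rfl), (show Int.toNat 13 = 13 from rfl), pvBDigit_eq_pvADigit, List.foldl]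
        exact pv_cnpj_iff _ _ _ (by omega)
      · rw [PySem.List.slice_to (xs := [c0,c1,c2,c3,c4,c5,c6,c7,c8,c9,c10,c11,c12,c13]) (b := 13) (by norm_num)]
        norm_num [pvACnpjDigito, pvAPesos2, pvBDv, PySem.List.pyRange_one, List.range_succ,
          PySem.List.pyGetD, PySem.List.pyGet?, PySem.List.pyIdx?, Function.comp, PySem.List.len,
          (show Int.toNat 0 = 0 from rfl), (show Int.toNat 1 = 1 from rfl), (show Int.toNat 2 = 2 from rfl), (show Int.toNat 3 = 3 from rfl), (show Int.toNat 4 = 4 from rfl), (show Int.toNat 5 = 5 from rfl), (show Int.toNat 6 = 6 from rfl), (show Int.toNat 7 = 7 from rfl), (show Int.toNat 8 = 8 from rfl), (show Int.toNat 9 = 9 from rfl), (show Int.toNat 10 = 10 from rfl), (show Int.toNat 11 = 11 from rfl), (show Int.toNat 12 = 12 from rfl), (show Int.toNat 13 = 13 from rfl), pvBDigit_eq_pvADigit, List.foldl]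
        exact pv_cnpj_iff _ _ _ (by omega)

-- ===== VERDICT (by name: the statement is the Claim_ definition above) =====
theorem classificar_doc_py_spec : Claim_equal_classificar_doc_py := by
  intro s _
  unfold Spec_classificar_doc_py classificar_doc_py classificar_doc_py_alt
  dsimp only
  split_ifs with h0 h11 h14 hpos
  · rfl
  · have hlen : (List.filter (fun c => PySem.Chars.isdigit c) (PySem.Str.strip s).toList).length = 11 := by
      simpa using h11
    have hd : ∀ c ∈ List.filter (fun c => PySem.Chars.isdigit c) (PySem.Str.strip s).toList,
        PySem.Chars.isdigit c := fun c hc => (List.mem_filter.mp hc).2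
    exact congrArg _ (pv_cpf_eq _ hlen hd)
  · have hlen : (List.filter (fun c => PySem.Chars.isdigit c) (PySem.Str.strip s).toList).length = 14 := by
      simpa using h14
    have hd : ∀ c ∈ List.filter (fun c => PySem.Chars.isdigit c) (PySem.Str.strip s).toList,
        PySem.Chars.isdigit c := fun c hc => (List.mem_filter.mp hc).2
    exact congrArg _ (pv_cnpj_eq _ hlen hd)
  · rfl
  · rfl
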